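-- pv_equiv track=rewrite | github.com/Howard1x5/argus | src/argus/phases/phase1_ingest.py | detect_systems
-- ===== SOURCE A (Python) =====
-- def detect_systems(events: list[dict]) -> dict:
--     """Auto-detect systems from parsed events.
--
--     Returns dict with detected hostnames, IPs, and OS indicators.
--     """
--     systems = {
--         "hostnames": set(),
--         "source_ips": set(),
--         "dest_ips": set(),
--         "usernames": set(),
--         "os_indicators": set(),
--     }
--
--     for event in events:
--         # Hostnames
--         if event.get("source_system"):
--             systems["hostnames"].add(event["source_system"])
--
--         # IPs
--         if event.get("source_ip"):
--             systems["source_ips"].add(event["source_ip"])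
--         if event.get("dest_ip"):
--             systems["dest_ips"].add(event["dest_ip"])
--
--         # Usernames
--         if event.get("username"):
--             systems["usernames"].add(event["username"])
--
--         # OS detection from event types and paths
--         event_type = event.get("event_type", "")
--         file_path = event.get("file_path", "")
--
--         if any(x in event_type for x in ["EVTX", "Windows", "Sysmon"]):
--             systems["os_indicators"].add("Windows")
--         elif any(x in event_type for x in ["syslog", "auth.log"]):
--             systems["os_indicators"].add("Linux")
--
--         if file_path:
--             if "\\" in file_path or file_path.startswith("C:"):
--                 systems["os_indicators"].add("Windows")
--             elif file_path.startswith("/"):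
--                 systems["os_indicators"].add("Linux/Unix")
--
--     # Convert sets to sorted lists
--     return {k: sorted(list(v)) for k, v in systems.items()}
-- ===== SOURCE B (Python) =====
-- def detect_systems(events: list[dict]) -> dict:
--     """Auto-detect systems from parsed events.
--
--     Different approach: flatten the events into one flat stream of
--     (category, value) tags, then per category sort the tagged values and
--     remove adjacent duplicates (sort-then-unique instead of hash sets).
--     """
--
--     def tags(e):
--         keymap = (("source_system", "hostnames"), ("source_ip", "source_ips"),
--                   ("dest_ip", "dest_ips"), ("username", "usernames"))
--         out = [(cat, e[key]) for key, cat in keymap if e.get(key)]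
--         et = e.get("event_type", "")
--         fp = e.get("file_path", "")
--         if "EVTX" in et or "Windows" in et or "Sysmon" in et:
--             out.append(("os_indicators", "Windows"))
--         elif "syslog" in et or "auth.log" in et:
--             out.append(("os_indicators", "Linux"))
--         if fp:
--             if "\\" in fp or fp.startswith("C:"):
--                 out.append(("os_indicators", "Windows"))
--             elif fp.startswith("/"):
--                 out.append(("os_indicators", "Linux/Unix"))
--         return out
--
--     stream = [t for e in events for t in tags(e)]
--
--     def uniq_sorted(cat):
--         vals = sorted(v for c, v in stream if c == cat)
--         res = []
--         prev = None
--         for v in vals: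
--             if prev is None or v != prev:
--                 res.append(v)
--             prev = v
--         return res
--
--     return {cat: uniq_sorted(cat)
--             for cat in ("hostnames", "source_ips", "dest_ips",
--                         "usernames", "os_indicators")}
-- ===== Notes on version B (the rewrite author's own statement) =====
-- stated objective: alternative
-- what changed: Instead of one loop mutating five hash sets, B flattens the events into one flat stream of (category, value) tags and then, per category, deduplicates by sorting the tagged values and dropping adjacent duplicates (sort-then-unique, no sets at all).
import Mathlib
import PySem

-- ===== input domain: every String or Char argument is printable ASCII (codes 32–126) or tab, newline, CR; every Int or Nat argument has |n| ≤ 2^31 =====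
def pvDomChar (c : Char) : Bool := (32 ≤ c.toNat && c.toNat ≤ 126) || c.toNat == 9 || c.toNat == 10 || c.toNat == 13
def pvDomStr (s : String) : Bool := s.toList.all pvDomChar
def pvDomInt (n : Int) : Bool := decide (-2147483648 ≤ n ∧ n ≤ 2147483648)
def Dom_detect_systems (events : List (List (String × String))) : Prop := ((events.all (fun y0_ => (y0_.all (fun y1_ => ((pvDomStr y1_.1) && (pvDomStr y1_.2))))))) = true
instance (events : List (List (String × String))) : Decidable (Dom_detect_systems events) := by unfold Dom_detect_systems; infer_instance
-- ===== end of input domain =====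

-- B replaces A's single loop over five mutated hash sets by a flat stream of (category, value)
-- tags deduplicated per category by sort-then-adjacent-unique; A and B agree on every input.

-- ===== PORT A =====
-- one fused fold over the events carrying all five accumulator sets, exactly as A's loop
def detect_systems (events : List (List (String × String))) : List (String × List String) :=
  let fin := events.foldl (fun st event =>
    let ev := PySem.Dict.mk event
    let hostnames := if (ev.getD "source_system" "") ≠ "" then PySem.Set.add st.1 (ev.getD "source_system" "") else st.1
    let source_ips := if (ev.getD "source_ip" "") ≠ "" then PySem.Set.add st.2.1 (ev.getD "source_ip" "") else st.2.1
    let dest_ips := if (ev.getD "dest_ip" "") ≠ "" then PySem.Set.add st.2.2.1 (ev.getD "dest_ip" "") else st.2.2.1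
    let usernames := if (ev.getD "username" "") ≠ "" then PySem.Set.add st.2.2.2.1 (ev.getD "username" "") else st.2.2.2.1
    let event_type := ev.getD "event_type" ""
    let file_path := ev.getD "file_path" ""
    let os_ind :=
      if ["EVTX", "Windows", "Sysmon"].any (fun x => PySem.Str.isIn x event_type) then PySem.Set.add st.2.2.2.2 "Windows"
      else if ["syslog", "auth.log"].any (fun x => PySem.Str.isIn x event_type) then PySem.Set.add st.2.2.2.2 "Linux"
      else st.2.2.2.2
    let os_ind :=
      if file_path ≠ "" then
        if PySem.Str.isIn "\\" file_path || PySem.Str.startswith file_path "C:" then PySem.Set.add os_ind "Windows"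
        else if PySem.Str.startswith file_path "/" then PySem.Set.add os_ind "Linux/Unix"
        else os_ind
      else os_ind
    (hostnames, source_ips, dest_ips, usernames, os_ind))
    (([] : PySem.Set String), ([] : PySem.Set String), ([] : PySem.Set String), ([] : PySem.Set String), ([] : PySem.Set String))
  [("hostnames", PySem.List.sorted fin.1 (fun x => x) false),
   ("source_ips", PySem.List.sorted fin.2.1 (fun x => x) false),
   ("dest_ips", PySem.List.sorted fin.2.2.1 (fun x => x) false),
   ("usernames", PySem.List.sorted fin.2.2.2.1 (fun x => x) false),
   ("os_indicators", PySem.List.sorted fin.2.2.2.2 (fun x => x) false)]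

-- ===== PORT B =====
-- e.get(key, "")
def pvGetE (event : List (String × String)) (key : String) : String :=
  (PySem.Dict.mk event).getD key ""

-- tags(e): the flat list of (category, value) tags one event contributes
def pvTags (e : List (String × String)) : List (String × String) :=
  let keymap : List (String × String) :=
    [("source_system", "hostnames"), ("source_ip", "source_ips"),
     ("dest_ip", "dest_ips"), ("username", "usernames")]
  let out := keymap.filterMap (fun kc =>
    if pvGetE e kc.1 ≠ "" then some (kc.2, pvGetE e kc.1) else none)
  let et := pvGetE e "event_type"
  let fp := pvGetE e "file_path"
  let out :=
    if PySem.Str.isIn "EVTX" et || PySem.Str.isIn "Windows" et || PySem.Str.isIn "Sysmon" et then out ++ [("os_indicators", "Windows")]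
    else if PySem.Str.isIn "syslog" et || PySem.Str.isIn "auth.log" et then out ++ [("os_indicators", "Linux")]
    else out
  let out :=
    if fp ≠ "" then
      if PySem.Str.isIn "\\" fp || PySem.Str.startswith fp "C:" then out ++ [("os_indicators", "Windows")]
      else if PySem.Str.startswith fp "/" then out ++ [("os_indicators", "Linux/Unix")]
      else out
    else out
  out

-- uniq_sorted(cat): sort the values tagged cat, then drop adjacent duplicates (prev-tracking loop)
def pvUniqSorted (stream : List (String × String)) (cat : String) : List String :=
  let vals := PySem.List.sorted (stream.filterMap (fun p => if p.1 = cat then some p.2 else none)) (fun x => x) false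
  (vals.foldl (fun (st : List String × Option String) v =>
      (if st.2 = none ∨ st.2 ≠ some v then st.1 ++ [v] else st.1, some v))
    (([] : List String), (none : Option String))).1

def detect_systems_alt (events : List (List (String × String))) : List (String × List String) :=
  let stream := events.flatMap pvTags
  [("hostnames", pvUniqSorted stream "hostnames"),
   ("source_ips", pvUniqSorted stream "source_ips"),
   ("dest_ips", pvUniqSorted stream "dest_ips"),
   ("usernames", pvUniqSorted stream "usernames"),
   ("os_indicators", pvUniqSorted stream "os_indicators")]

-- ===== PRECONDITION & SPEC =====
def Spec_detect_systems (events : List (List (String × String))) (out : List (String × List String)) : Prop := out = detect_systems_alt events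
instance (events : List (List (String × String))) (out : List (String × List String)) : Decidable (Spec_detect_systems events out) := by unfold Spec_detect_systems; infer_instance

-- ===== CLAIM (what is proved, stated in full; the proofs are below) =====
def Claim_equal_detect_systems : Prop := ∀ (events : List (List (String × String))), Dom_detect_systems events → Spec_detect_systems events (detect_systems events)

-- ===== LEMMAS AND PROOFS =====

-- A's conditional-add step for one plain string field
def pvCondAdd (key : String) (s : PySem.Set String) (event : List (String × String)) : PySem.Set String :=
  if pvGetE event key ≠ "" then PySem.Set.add s (pvGetE event key) else s

-- A's os_indicators step
def pvStepO (s : PySem.Set String) (event : List (String × String)) : PySem.Set String :=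
  let event_type := pvGetE event "event_type"
  let file_path := pvGetE event "file_path"
  let os_ind :=
    if ["EVTX", "Windows", "Sysmon"].any (fun x => PySem.Str.isIn x event_type) then PySem.Set.add s "Windows"
    else if ["syslog", "auth.log"].any (fun x => PySem.Str.isIn x event_type) then PySem.Set.add s "Linux"
    else s
  if file_path ≠ "" then
    if PySem.Str.isIn "\\" file_path || PySem.Str.startswith file_path "C:" then PySem.Set.add os_ind "Windows"
    else if PySem.Str.startswith file_path "/" then PySem.Set.add os_ind "Linux/Unix"
    else os_ind
  else os_ind

-- the per-event OS marks (as a set), for stating memberships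
def pvOsMarks (event : List (String × String)) : PySem.Set String :=
  pvStepO PySem.Set.empty event

-- A's fused fold splits into five independent folds
lemma pv_fold_split (l : List (List (String × String)))
    (st : PySem.Set String × PySem.Set String × PySem.Set String × PySem.Set String × PySem.Set String) :
    l.foldl (fun st event =>
      let ev := PySem.Dict.mk event
      let hostnames := if (ev.getD "source_system" "") ≠ "" then PySem.Set.add st.1 (ev.getD "source_system" "") else st.1
      let source_ips := if (ev.getD "source_ip" "") ≠ "" then PySem.Set.add st.2.1 (ev.getD "source_ip" "") else st.2.1
      let dest_ips := if (ev.getD "dest_ip" "") ≠ "" then PySem.Set.add st.2.2.1 (ev.getD "dest_ip" "") else st.2.2.1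
      let usernames := if (ev.getD "username" "") ≠ "" then PySem.Set.add st.2.2.2.1 (ev.getD "username" "") else st.2.2.2.1
      let event_type := ev.getD "event_type" ""
      let file_path := ev.getD "file_path" ""
      let os_ind :=
        if ["EVTX", "Windows", "Sysmon"].any (fun x => PySem.Str.isIn x event_type) then PySem.Set.add st.2.2.2.2 "Windows"
        else if ["syslog", "auth.log"].any (fun x => PySem.Str.isIn x event_type) then PySem.Set.add st.2.2.2.2 "Linux"
        else st.2.2.2.2
      let os_ind :=
        if file_path ≠ "" then
          if PySem.Str.isIn "\\" file_path || PySem.Str.startswith file_path "C:" then PySem.Set.add os_ind "Windows"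
          else if PySem.Str.startswith file_path "/" then PySem.Set.add os_ind "Linux/Unix"
          else os_ind
        else os_ind
      (hostnames, source_ips, dest_ips, usernames, os_ind)) st
    = (l.foldl (pvCondAdd "source_system") st.1,
       l.foldl (pvCondAdd "source_ip") st.2.1,
       l.foldl (pvCondAdd "dest_ip") st.2.2.1,
       l.foldl (pvCondAdd "username") st.2.2.2.1,
       l.foldl pvStepO st.2.2.2.2) := by
  induction l generalizing st with
  | nil => rfl
  | cons e t ih =>
      simp only [List.foldl_cons]
      rw [ih]
      rfl

lemma pv_mem_foldl_condAdd (key : String) (l : List (List (String × String))) (s : PySem.Set String) (x : String) :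
    x ∈ l.foldl (pvCondAdd key) s ↔ x ∈ s ∨ ∃ e ∈ l, pvGetE e key ≠ "" ∧ pvGetE e key = x := by
  induction l generalizing s with
  | nil => simp
  | cons e t ih =>
      simp only [List.foldl_cons, ih, List.mem_cons]
      unfold pvCondAdd
      split_ifs with h
      · simp only [PySem.Set.mem_add]
        constructor
        · rintro ((hs | hx) | ⟨e', he', h1, h2⟩)
          · exact Or.inl hs
          · exact Or.inr ⟨e, Or.inl rfl, h, hx.symm⟩
          · exact Or.inr ⟨e', Or.inr he', h1, h2⟩
        · rintro (hs | ⟨e', (rfl | he'), h1, h2⟩)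
          · exact Or.inl (Or.inl hs)
          · exact Or.inl (Or.inr h2.symm)
          · exact Or.inr ⟨e', he', h1, h2⟩
      · constructor
        · rintro (hs | ⟨e', he', h1, h2⟩)
          · exact Or.inl hs
          · exact Or.inr ⟨e', Or.inr he', h1, h2⟩
        · rintro (hs | ⟨e', (rfl | he'), h1, h2⟩)
          · exact Or.inl hs
          · exact absurd h1 h
          · exact Or.inr ⟨e', he', h1, h2⟩

lemma pv_nodup_foldl_condAdd (key : String) (l : List (List (String × String))) (s : PySem.Set String)
    (hs : s.Nodup) : (l.foldl (pvCondAdd key) s).Nodup := by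
  induction l generalizing s with
  | nil => exact hs
  | cons e t ih =>
      refine ih _ ?_
      unfold pvCondAdd
      split_ifs with h
      · exact PySem.Set.nodup_add _ _ hs
      · exact hs

lemma pv_mem_stepO (s : PySem.Set String) (e : List (String × String)) (x : String) :
    x ∈ pvStepO s e ↔ x ∈ s ∨ x ∈ pvOsMarks e := by
  unfold pvOsMarks pvStepO
  dsimp only
  split_ifs <;> simp [PySem.Set.mem_add, PySem.Set.empty] <;> tauto

lemma pv_nodup_stepO (s : PySem.Set String) (e : List (String × String)) (hs : s.Nodup) :
    (pvStepO s e).Nodup := by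
  unfold pvStepO
  dsimp only
  split_ifs <;>
    first
      | exact hs
      | exact PySem.Set.nodup_add _ _ hs
      | exact PySem.Set.nodup_add _ _ (PySem.Set.nodup_add _ _ hs)

lemma pv_mem_foldl_stepO (l : List (List (String × String))) (s : PySem.Set String) (x : String) :
    x ∈ l.foldl pvStepO s ↔ x ∈ s ∨ ∃ e ∈ l, x ∈ pvOsMarks e := by
  induction l generalizing s with
  | nil => simp
  | cons e t ih =>
      simp only [List.foldl_cons, ih, pv_mem_stepO, List.mem_cons]
      constructor
      · rintro ((h | h) | ⟨e', he', hx⟩)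
        · exact Or.inl h
        · exact Or.inr ⟨e, Or.inl rfl, h⟩
        · exact Or.inr ⟨e', Or.inr he', hx⟩
      · rintro (h | ⟨e', (rfl | he'), hx⟩)
        · exact Or.inl (Or.inl h)
        · exact Or.inl (Or.inr hx)
        · exact Or.inr ⟨e', he', hx⟩

lemma pv_nodup_foldl_stepO (l : List (List (String × String))) (s : PySem.Set String)
    (hs : s.Nodup) : (l.foldl pvStepO s).Nodup := by
  induction l generalizing s with
  | nil => exact hs
  | cons e t ih => exact ih _ (pv_nodup_stepO s e hs)

-- what the tag list selects per plain field
set_option maxHeartbeats 2000000 in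
lemma pv_tags_host (e : List (String × String)) :
    (pvTags e).filterMap (fun p => if p.1 = "hostnames" then some p.2 else none)
      = if pvGetE e "source_system" ≠ "" then [pvGetE e "source_system"] else [] := by
  dsimp only [pvTags]
  generalize hF : (List.filterMap (fun kc =>
      if pvGetE e kc.1 ≠ "" then some (kc.2, pvGetE e kc.1) else none)
      [(("source_system":String), ("hostnames":String)), ("source_ip", "source_ips"),
       ("dest_ip", "dest_ips"), ("username", "usernames")]) = F
  have hcore : F.filterMap (fun p => if p.1 = "hostnames" then some p.2 else none)
      = if pvGetE e "source_system" ≠ "" then [pvGetE e "source_system"] else [] := by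
    rw [← hF, List.filterMap_filterMap]
    simp only [List.filterMap_cons, List.filterMap_nil]
    split_ifs <;> simp_all
  split_ifs <;>
      (try simp only [List.filterMap_append, List.filterMap_cons, List.filterMap_nil,
        String.reduceEq, reduceIte, List.append_nil, List.append_assoc]) <;>
    rw [hcore] <;> try simp_all

set_option maxHeartbeats 2000000 in
lemma pv_tags_sip (e : List (String × String)) :
    (pvTags e).filterMap (fun p => if p.1 = "source_ips" then some p.2 else none)
      = if pvGetE e "source_ip" ≠ "" then [pvGetE e "source_ip"] else [] := by
  dsimp only [pvTags]
  generalize hF : (List.filterMap (fun kc =>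
      if pvGetE e kc.1 ≠ "" then some (kc.2, pvGetE e kc.1) else none)
      [(("source_system":String), ("hostnames":String)), ("source_ip", "source_ips"),
       ("dest_ip", "dest_ips"), ("username", "usernames")]) = F
  have hcore : F.filterMap (fun p => if p.1 = "source_ips" then some p.2 else none)
      = if pvGetE e "source_ip" ≠ "" then [pvGetE e "source_ip"] else [] := by
    rw [← hF, List.filterMap_filterMap]
    simp only [List.filterMap_cons, List.filterMap_nil]
    split_ifs <;> simp_all
  split_ifs <;>
      (try simp only [List.filterMap_append, List.filterMap_cons, List.filterMap_nil,
        String.reduceEq, reduceIte, List.append_nil, List.append_assoc]) <;>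
    rw [hcore] <;> try simp_all

set_option maxHeartbeats 2000000 in
lemma pv_tags_dip (e : List (String × String)) :
    (pvTags e).filterMap (fun p => if p.1 = "dest_ips" then some p.2 else none)
      = if pvGetE e "dest_ip" ≠ "" then [pvGetE e "dest_ip"] else [] := by
  dsimp only [pvTags]
  generalize hF : (List.filterMap (fun kc =>
      if pvGetE e kc.1 ≠ "" then some (kc.2, pvGetE e kc.1) else none)
      [(("source_system":String), ("hostnames":String)), ("source_ip", "source_ips"),
       ("dest_ip", "dest_ips"), ("username", "usernames")]) = F
  have hcore : F.filterMap (fun p => if p.1 = "dest_ips" then some p.2 else none)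
      = if pvGetE e "dest_ip" ≠ "" then [pvGetE e "dest_ip"] else [] := by
    rw [← hF, List.filterMap_filterMap]
    simp only [List.filterMap_cons, List.filterMap_nil]
    split_ifs <;> simp_all
  split_ifs <;>
      (try simp only [List.filterMap_append, List.filterMap_cons, List.filterMap_nil,
        String.reduceEq, reduceIte, List.append_nil, List.append_assoc]) <;>
    rw [hcore] <;> try simp_all

set_option maxHeartbeats 2000000 in
lemma pv_tags_user (e : List (String × String)) :
    (pvTags e).filterMap (fun p => if p.1 = "usernames" then some p.2 else none)
      = if pvGetE e "username" ≠ "" then [pvGetE e "username"] else [] := by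
  dsimp only [pvTags]
  generalize hF : (List.filterMap (fun kc =>
      if pvGetE e kc.1 ≠ "" then some (kc.2, pvGetE e kc.1) else none)
      [(("source_system":String), ("hostnames":String)), ("source_ip", "source_ips"),
       ("dest_ip", "dest_ips"), ("username", "usernames")]) = F
  have hcore : F.filterMap (fun p => if p.1 = "usernames" then some p.2 else none)
      = if pvGetE e "username" ≠ "" then [pvGetE e "username"] else [] := by
    rw [← hF, List.filterMap_filterMap]
    simp only [List.filterMap_cons, List.filterMap_nil]
    split_ifs <;> simp_all
  split_ifs <;>
      (try simp only [List.filterMap_append, List.filterMap_cons, List.filterMap_nil,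
        String.reduceEq, reduceIte, List.append_nil, List.append_assoc]) <;>
    rw [hcore] <;> try simp_all

set_option maxHeartbeats 2000000 in
lemma pv_tags_os (e : List (String × String)) (a : String) :
    a ∈ (pvTags e).filterMap (fun p => if p.1 = "os_indicators" then some p.2 else none)
      ↔ a ∈ pvOsMarks e := by
  dsimp only [pvTags, pvOsMarks, pvStepO]
  simp only [List.any_cons, List.any_nil, Bool.or_false]
  generalize hF : (List.filterMap (fun kc =>
      if pvGetE e kc.1 ≠ "" then some (kc.2, pvGetE e kc.1) else none)
      [(("source_system":String), ("hostnames":String)), ("source_ip", "source_ips"),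
       ("dest_ip", "dest_ips"), ("username", "usernames")]) = F
  have hcore : F.filterMap (fun p => if p.1 = "os_indicators" then some p.2 else none) = [] := by
    rw [← hF, List.filterMap_filterMap]
    simp only [List.filterMap_cons, List.filterMap_nil]
    split_ifs <;> simp_all
  split_ifs <;>
      (try simp only [List.filterMap_append, List.filterMap_cons, List.filterMap_nil,
        String.reduceEq, reduceIte, List.append_nil, List.append_assoc]) <;>
    rw [hcore] <;>
    simp_all [PySem.Set.mem_add, PySem.Set.empty]

-- the adjacent-dedup loop, reformulated as structural recursion on the value list
def pvAux : Option String → List String → List String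
  | _, [] => []
  | prev, v :: t => if prev = none ∨ prev ≠ some v then v :: pvAux (some v) t else pvAux (some v) t

lemma pv_foldl_aux (l : List String) (res : List String) (prev : Option String) :
    (l.foldl (fun (st : List String × Option String) v =>
        (if st.2 = none ∨ st.2 ≠ some v then st.1 ++ [v] else st.1, some v)) (res, prev)).1
      = res ++ pvAux prev l := by
  induction l generalizing res prev with
  | nil => simp [pvAux]
  | cons v t ih =>
      simp only [List.foldl_cons, pvAux]
      split_ifs with h
      · rw [ih]; simp
      · rw [ih]

lemma pv_aux_sorted (l : List String) : ∀ (p : String), l.Pairwise (· ≤ ·) → (∀ x ∈ l, p ≤ x) →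
    (∀ a, a ∈ pvAux (some p) l ↔ a ∈ l ∧ a ≠ p) ∧ (pvAux (some p) l).Pairwise (· < ·) ∧
      (∀ x ∈ pvAux (some p) l, p < x) := by
  induction l with
  | nil => intro p _ _; simp [pvAux]
  | cons v t ih =>
      intro p hl hp
      have hvt : ∀ x ∈ t, v ≤ x := fun x hx => (List.pairwise_cons.mp hl).1 x hx
      have ht : t.Pairwise (· ≤ ·) := (List.pairwise_cons.mp hl).2
      obtain ⟨ihm, ihpw, ihgt⟩ := ih v ht hvt
      by_cases hpv : p = v
      · subst hpv
        have heq : pvAux (some p) (p :: t) = pvAux (some p) t := by simp [pvAux]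
        rw [heq]
        refine ⟨fun a => ?_, ihpw, ihgt⟩
        rw [ihm a]
        constructor
        · rintro ⟨ha, hne⟩; exact ⟨List.mem_cons_of_mem _ ha, hne⟩
        · rintro ⟨ha, hne⟩
          rcases List.mem_cons.mp ha with rfl | ha
          · exact absurd rfl hne
          · exact ⟨ha, hne⟩
      · have hplt : p < v := lt_of_le_of_ne (hp v (List.mem_cons_self)) hpv
        have heq : pvAux (some p) (v :: t) = v :: pvAux (some v) t := by simp [pvAux, hpv]
        rw [heq]
        refine ⟨fun a => ?_, ?_, ?_⟩
        · simp only [List.mem_cons, ihm a]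
          constructor
          · rintro (rfl | ⟨ha, hne⟩)
            · exact ⟨Or.inl rfl, hplt.ne'⟩
            · exact ⟨Or.inr ha, (lt_of_lt_of_le hplt (hvt a ha)).ne'⟩
          · rintro ⟨(rfl | ha), hne⟩
            · exact Or.inl rfl
            · by_cases hav : a = v
              · exact Or.inl hav
              · exact Or.inr ⟨ha, hav⟩
        · exact List.pairwise_cons.mpr ⟨fun x hx => ihgt x hx, ihpw⟩
        · intro x hx
          rcases List.mem_cons.mp hx with rfl | hx
          · exact hplt
          · exact lt_trans hplt (ihgt x hx)

lemma pv_aux_top (l : List String) (hl : l.Pairwise (· ≤ ·)) :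
    (∀ a, a ∈ pvAux none l ↔ a ∈ l) ∧ (pvAux none l).Pairwise (· < ·) := by
  cases l with
  | nil => simp [pvAux]
  | cons v t =>
      have hvt : ∀ x ∈ t, v ≤ x := fun x hx => (List.pairwise_cons.mp hl).1 x hx
      have ht : t.Pairwise (· ≤ ·) := (List.pairwise_cons.mp hl).2
      obtain ⟨ihm, ihpw, ihgt⟩ := pv_aux_sorted t v ht hvt
      have heq : pvAux none (v :: t) = v :: pvAux (some v) t := by simp [pvAux]
      rw [heq]
      refine ⟨fun a => ?_, List.pairwise_cons.mpr ⟨fun x hx => ihgt x hx, ihpw⟩⟩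
      simp only [List.mem_cons, ihm a]
      constructor
      · rintro (rfl | ⟨ha, _⟩)
        · exact Or.inl rfl
        · exact Or.inr ha
      · rintro (rfl | ha)
        · exact Or.inl rfl
        · by_cases hav : a = v
          · exact Or.inl hav
          · exact Or.inr ⟨ha, hav⟩

-- master: sorting a duplicate-carrying list and dropping adjacent duplicates computes
-- exactly the sorted listing of any nodup set with the same members
lemma pv_master (L S : List String) (hS : S.Nodup) (h : ∀ a, a ∈ S ↔ a ∈ L) :
    PySem.List.sorted S (fun x => x) false
      = ((PySem.List.sorted L (fun x => x) false).foldl (fun (st : List String × Option String) v =>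
          (if st.2 = none ∨ st.2 ≠ some v then st.1 ++ [v] else st.1, some v))
          (([] : List String), (none : Option String))).1 := by
  rw [pv_foldl_aux, List.nil_append]
  have hl : (PySem.List.sorted L (fun x => x) false).Pairwise (· ≤ ·) :=
    PySem.List.sorted_pairwise L (fun x => x)
  obtain ⟨hm, hpw⟩ := pv_aux_top _ hl
  have hnd : (pvAux none (PySem.List.sorted L (fun x => x) false)).Nodup :=
    hpw.imp (fun h => ne_of_lt h)
  apply PySem.List.sorted_eq_of_perm_of_pairwise_lt
  · refine (List.perm_ext_iff_of_nodup hnd hS).mpr fun a => ?_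
    rw [hm a, PySem.List.mem_sorted, ← h a]
  · exact hpw

lemma pv_field_eq (key cat : String) (events : List (List (String × String)))
    (hsel : ∀ e, (pvTags e).filterMap (fun p => if p.1 = cat then some p.2 else none)
      = if pvGetE e key ≠ "" then [pvGetE e key] else []) :
    PySem.List.sorted (events.foldl (pvCondAdd key) []) (fun x => x) false
      = pvUniqSorted (events.flatMap pvTags) cat := by
  unfold pvUniqSorted
  apply pv_master
  · exact pv_nodup_foldl_condAdd key events [] List.nodup_nil
  · intro a
    rw [pv_mem_foldl_condAdd]
    simp only [List.not_mem_nil, false_or]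
    have hsel' : ∀ e, a ∈ (pvTags e).filterMap (fun p => if p.1 = cat then some p.2 else none)
        ↔ (pvGetE e key ≠ "" ∧ pvGetE e key = a) := by
      intro e
      rw [hsel e]
      split_ifs with h
      · simp [h, eq_comm]
      · simp [h]
    constructor
    · rintro ⟨e, he, hv⟩
      obtain ⟨p, hp, hpa⟩ := List.mem_filterMap.mp ((hsel' e).mpr hv)
      exact List.mem_filterMap.mpr ⟨p, List.mem_flatMap.mpr ⟨e, he, hp⟩, hpa⟩
    · intro hmem
      obtain ⟨p, hpm, hpa⟩ := List.mem_filterMap.mp hmem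
      obtain ⟨e, he, hp⟩ := List.mem_flatMap.mp hpm
      exact ⟨e, he, (hsel' e).mp (List.mem_filterMap.mpr ⟨p, hp, hpa⟩)⟩

lemma pv_os_eq (events : List (List (String × String))) :
    PySem.List.sorted (events.foldl pvStepO []) (fun x => x) false
      = pvUniqSorted (events.flatMap pvTags) "os_indicators" := by
  unfold pvUniqSorted
  apply pv_master
  · exact pv_nodup_foldl_stepO events [] List.nodup_nil
  · intro a
    rw [pv_mem_foldl_stepO]
    simp only [List.not_mem_nil, false_or]
    constructor
    · rintro ⟨e, he, hx⟩
      obtain ⟨p, hp, hpa⟩ := List.mem_filterMap.mp ((pv_tags_os e a).mpr hx)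
      exact List.mem_filterMap.mpr ⟨p, List.mem_flatMap.mpr ⟨e, he, hp⟩, hpa⟩
    · intro hmem
      obtain ⟨p, hpm, hpa⟩ := List.mem_filterMap.mp hmem
      obtain ⟨e, he, hp⟩ := List.mem_flatMap.mp hpm
      exact ⟨e, he, (pv_tags_os e a).mp (List.mem_filterMap.mpr ⟨p, hp, hpa⟩)⟩

-- ===== VERDICT (by name: the statement is the Claim_ definition above) =====
theorem detect_systems_spec : Claim_equal_detect_systems := by
  intro events _
  unfold Spec_detect_systems detect_systems detect_systems_alt
  rw [pv_fold_split]
  simp only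
  rw [pv_field_eq "source_system" "hostnames" events pv_tags_host,
      pv_field_eq "source_ip" "source_ips" events pv_tags_sip,
      pv_field_eq "dest_ip" "dest_ips" events pv_tags_dip,
      pv_field_eq "username" "usernames" events pv_tags_user,
      pv_os_eq]
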